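-- pv_equiv track=rewrite | github.com/russhustle/leetpattern | src/python/901_1200/1025_divisor_game.py | divisorGameDP
-- ===== SOURCE A (Python) =====
-- def divisorGameDP(n: int) -> bool:
--     if n <= 1:
--         return False
--
--     dp = [False for _ in range(n + 1)]
--
--     for i in range(2, n + 1):
--         for j in range(1, i):
--             if i % j == 0 and not dp[i - j]:
--                 dp[i] = True
--                 break
--
--     return dp[n]
-- ===== SOURCE B (Python) =====
-- def divisorGameDP(n: int) -> bool:
--     # Alice wins exactly when n is even (and the game is playable, i.e. n > 1).
--     return n > 1 and n % 2 == 0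
-- ===== Notes on version B (the rewrite author's own statement) =====
-- stated objective: faster
-- what changed: Replaced the O(n^2) bottom-up DP over all divisors by the closed-form parity rule: Alice wins iff n > 1 and n is even.
import Mathlib
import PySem

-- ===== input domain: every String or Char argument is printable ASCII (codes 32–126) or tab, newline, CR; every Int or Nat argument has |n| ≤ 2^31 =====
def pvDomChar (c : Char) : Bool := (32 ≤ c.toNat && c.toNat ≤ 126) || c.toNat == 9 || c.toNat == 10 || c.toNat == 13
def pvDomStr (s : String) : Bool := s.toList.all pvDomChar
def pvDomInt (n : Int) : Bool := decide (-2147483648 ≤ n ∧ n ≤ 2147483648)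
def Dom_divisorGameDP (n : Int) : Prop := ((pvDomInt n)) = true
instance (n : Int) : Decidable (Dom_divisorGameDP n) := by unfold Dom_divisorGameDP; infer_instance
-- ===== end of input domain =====

-- B replaces A's O(n^2) bottom-up DP by the closed-form parity rule (Alice wins iff n > 1 and n is even).

-- ===== PORT A =====
-- body of the `for i` loop: the inner `for j` loop with `break` sets dp[i] = True on the
-- first j in range(1, i) with i % j == 0 and not dp[i - j]; `any` captures exactly that,
-- and `setIfInBounds` is exact since Python's dp[i] = True here always has i in range.
def aStep (dp : Array Bool) (i : Nat) : Array Bool :=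
  if (List.range' 1 (i - 1)).any (fun j => i % j == 0 && !(dp.getD (i - j) false)) then
    dp.setIfInBounds i true
  else dp

def divisorGameDP (n : Int) : Bool :=
  if n ≤ 1 then false
  else
    -- here n ≥ 2, so n.toNat = n exactly; range(2, n+1) = List.range' 2 (n-1)
    let N := n.toNat
    let dp0 : Array Bool := Array.replicate (N + 1) false   -- [False for _ in range(n+1)]
    let dp := (List.range' 2 (N - 1)).foldl aStep dp0
    dp.getD N false

-- ===== PORT B =====
def divisorGameDP_alt (n : Int) : Bool :=
  decide (1 < n ∧ n % 2 = 0)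

-- ===== PRECONDITION & SPEC =====
def Spec_divisorGameDP (n : Int) (out : Bool) : Prop := out = divisorGameDP_alt n
instance (n : Int) (out : Bool) : Decidable (Spec_divisorGameDP n out) := by unfold Spec_divisorGameDP; infer_instance

-- ===== CLAIM (what is proved, stated in full; the proofs are below) =====
def Claim_equal_divisorGameDP : Prop := ∀ (n : Int), Dom_divisorGameDP n → Spec_divisorGameDP n (divisorGameDP n)

-- ===== LEMMAS AND PROOFS =====

-- invariant: after folding aStep over range' 2 m (i.e. processing i = 2 .. m+1),
-- dp has size N+1 and dp[k] = (2 ≤ k ∧ k ≤ m+1 ∧ k even) for all k ≤ N.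
theorem aFold_inv (N : Nat) (hN : 2 ≤ N) : ∀ (m : Nat), m ≤ N - 1 →
    ((List.range' 2 m).foldl aStep (Array.replicate (N + 1) false)).size = N + 1 ∧
    ∀ k, k ≤ N →
      ((List.range' 2 m).foldl aStep (Array.replicate (N + 1) false)).getD k false
        = decide (2 ≤ k ∧ k ≤ m + 1 ∧ k % 2 = 0) := by
  intro m
  induction m with
  | zero =>
    intro _
    constructor
    · simp
    · intro k hk
      simp [Array.getD]
      omega
  | succ m ih =>
    intro hm
    obtain ⟨hsz, hdp⟩ := ih (by omega)
    rw [List.range'_1_concat, List.foldl_append]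
    set dp := (List.range' 2 m).foldl aStep (Array.replicate (N + 1) false) with hdpdef
    simp only [List.foldl_cons, List.foldl_nil]
    have hi : 2 + m = m + 2 := by omega
    rw [hi]
    -- the inner `any` condition equals the parity of i = m + 2
    have hcond : (List.range' 1 (m + 2 - 1)).any
        (fun j => (m + 2) % j == 0 && !(dp.getD (m + 2 - j) false)) = decide ((m + 2) % 2 = 0) := by
      by_cases hpar : (m + 2) % 2 = 0
      · simp only [hpar, decide_true]
        rw [List.any_eq_true]
        refine ⟨1, ?_, ?_⟩
        · rw [List.mem_range'_1]
          omega
        · have e1 : m + 2 - 1 = m + 1 := by omega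
          rw [e1, hdp (m + 1) (by omega)]
          have hfalse : decide (2 ≤ m + 1 ∧ m + 1 ≤ m + 1 ∧ (m + 1) % 2 = 0) = false :=
            decide_eq_false (by omega)
          rw [hfalse]
          simp [Nat.mod_one]
      · simp only [hpar, decide_false]
        rw [List.any_eq_false]
        intro j hj
        rw [List.mem_range'_1] at hj
        obtain ⟨hj1, hj2⟩ := hj
        by_cases hdvd : (m + 2) % j = 0
        · have hjdvd : j ∣ (m + 2) := Nat.dvd_of_mod_eq_zero hdvd
          have hjodd : j % 2 = 1 := by
            rcases Nat.even_or_odd j with he | ho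
            · exfalso
              have h2 : 2 ∣ (m + 2) := he.two_dvd.trans hjdvd
              omega
            · exact Nat.odd_iff.mp ho
          have hsubeven : (m + 2 - j) % 2 = 0 := by omega
          have htrue : dp.getD (m + 2 - j) false = true := by
            rw [hdp _ (by omega)]
            exact decide_eq_true (by omega)
          simp [htrue]
        · simp [hdvd]
    simp only [aStep, hcond]
    by_cases hpar : (m + 2) % 2 = 0
    · rw [if_pos (by simp [hpar])]
      refine ⟨by simp [hsz], fun k hk => ?_⟩
      rw [Array.getD_eq_getD_getElem?, Array.getElem?_setIfInBounds]
      by_cases hkm : m + 2 = k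
      · rw [if_pos hkm, if_pos (by omega), Option.getD_some]
        exact (decide_eq_true (by omega)).symm
      · rw [if_neg hkm, ← Array.getD_eq_getD_getElem?, hdp k hk]
        exact decide_eq_decide.mpr (by omega)
    · rw [if_neg (by simp only [decide_eq_true_eq]; omega)]
      refine ⟨hsz, fun k hk => ?_⟩
      rw [hdp k hk]
      exact decide_eq_decide.mpr (by omega)

theorem divisorGameDP_eq (n : Int) : divisorGameDP n = divisorGameDP_alt n := by
  unfold divisorGameDP divisorGameDP_alt
  by_cases h : n ≤ 1
  · rw [if_pos h]
    have : ¬ (1 < n ∧ n % 2 = 0) := by omega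
    exact (decide_eq_false this).symm
  · rw [if_neg h]
    have hN : 2 ≤ n.toNat := by omega
    obtain ⟨_, hdp⟩ := aFold_inv n.toNat hN (n.toNat - 1) (le_refl _)
    rw [hdp n.toNat (le_refl _)]
    have : (2 ≤ n.toNat ∧ n.toNat ≤ n.toNat - 1 + 1 ∧ n.toNat % 2 = 0) ↔ (1 < n ∧ n % 2 = 0) := by
      omega
    simp only [this]

-- ===== VERDICT (by name: the statement is the Claim_ definition above) =====
theorem divisorGameDP_spec : Claim_equal_divisorGameDP := by
  intro n _
  exact divisorGameDP_eq n
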